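-- pv_equiv track=rewrite | github.com/tuseto/PythonHomeWork | week3/2-Resolve-with-Functions/prime_digit.py | check
-- ===== SOURCE A (Python) =====
-- def is_prime(n):
--     if n <= 1:
--         is_prime = False
--     else:
--         is_prime = True
--     for i in range(2,n):
--         if n % i == 0:
--             is_prime = False
--     return(is_prime)
--
-- def check(digits):
--     prime_digit = False
--     for el in digits:
--         if is_prime(el) == True:
--             prime_digit = True
--             break
--     if prime_digit:
--         return("Yes there is prime digit")
--     else:
--         return("There isnt prime digit")
-- ===== SOURCE B (Python) =====
-- def _has_no_small_divisor(n):
--     i = 2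
--     while i * i <= n:
--         if n % i == 0:
--             return False
--         i += 1
--     return True
--
-- def check(digits):
--     for n in digits:
--         if n >= 2 and _has_no_small_divisor(n):
--             return "Yes there is prime digit"
--     return "There isnt prime digit"
-- ===== Notes on version B (the rewrite author's own statement) =====
-- stated objective: faster
-- what changed: Replaces A's full trial division over range(2,n) for every element (continuing even after a divisor is found) with an early-exit divisor test only up to sqrt(n), returning from the scan as soon as a prime is found.
import Mathlib
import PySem

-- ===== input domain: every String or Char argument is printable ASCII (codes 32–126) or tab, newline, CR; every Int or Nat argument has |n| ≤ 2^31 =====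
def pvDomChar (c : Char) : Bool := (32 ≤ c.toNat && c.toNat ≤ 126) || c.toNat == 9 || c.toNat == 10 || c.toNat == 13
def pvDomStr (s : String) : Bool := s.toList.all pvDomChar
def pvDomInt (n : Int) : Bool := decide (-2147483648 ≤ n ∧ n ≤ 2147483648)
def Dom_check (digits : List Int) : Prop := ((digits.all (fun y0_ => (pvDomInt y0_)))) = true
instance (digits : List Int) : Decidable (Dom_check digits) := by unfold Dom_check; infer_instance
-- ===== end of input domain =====

-- B replaces A's full trial division over range(2,n) with an early-exit divisor search up to √n; faster per element.

-- ===== PORT A =====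
-- is_prime: flag initialised by n ≤ 1, then full scan over range(2, n) clearing it on any divisor
def is_primeA (n : Int) : Bool :=
  let b0 : Bool := if n ≤ 1 then false else true
  (PySem.List.pyRange 2 n 1).foldl (fun acc i => if PySem.Int.mod n i = 0 then false else acc) b0

-- the for/break loop of check: first element with is_prime sets the flag and breaks
def checkLoopA : List Int → Bool
  | [] => false
  | el :: rest => if is_primeA el = true then true else checkLoopA rest

def check (digits : List Int) : String :=
  if checkLoopA digits then "Yes there is prime digit" else "There isnt prime digit"

-- ===== PORT B =====
-- while i*i <= n: return False on a divisor, else i += 1; True when the loop ends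
def noSmallDiv (n i : Int) : Bool :=
  if _h : i * i ≤ n then
    if PySem.Int.mod n i = 0 then false else noSmallDiv n (i + 1)
  else true
  termination_by (n + 1 - i).toNat
  decreasing_by
    have hin : i ≤ n := by
      by_cases h0 : i ≤ 0
      · have := mul_self_nonneg i; omega
      · have : i * 1 ≤ i * i := mul_le_mul_of_nonneg_left (by omega) (by omega)
        omega
    omega

def check_alt : List Int → String
  | [] => "There isnt prime digit"
  | n :: rest =>
    if 2 ≤ n ∧ noSmallDiv n 2 = true then "Yes there is prime digit" else check_alt rest

-- ===== PRECONDITION & SPEC =====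
def Spec_check (digits : List Int) (out : String) : Prop := out = check_alt digits
instance (digits : List Int) (out : String) : Decidable (Spec_check digits out) := by unfold Spec_check; infer_instance

-- ===== CLAIM (what is proved, stated in full; the proofs are below) =====
def Claim_equal_check : Prop := ∀ (digits : List Int), Dom_check digits → Spec_check digits (check digits)

-- ===== LEMMAS AND PROOFS =====

-- A's loop body clears the flag on a divisor and never sets it: the fold is an 'all'
theorem foldl_clear_eq_all (p : Int → Prop) [DecidablePred p] :
    ∀ (l : List Int) (b : Bool),
      l.foldl (fun acc i => if p i then false else acc) b = (b && l.all (fun i => !decide (p i))) := by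
  intro l
  induction l with
  | nil => intro b; simp
  | cons x xs ih =>
    intro b
    rw [List.foldl_cons]
    by_cases hx : p x
    · rw [if_pos hx, ih]; simp [hx]
    · rw [if_neg hx, ih]; simp [hx]

theorem is_primeA_iff (n : Int) :
    is_primeA n = true ↔ (2 ≤ n ∧ ∀ i : Int, 2 ≤ i → i < n → ¬ (i ∣ n)) := by
  unfold is_primeA
  rw [foldl_clear_eq_all (fun i => PySem.Int.mod n i = 0)]
  have hb0 : ((if n ≤ 1 then (false : Bool) else true) = true) ↔ 2 ≤ n := by
    by_cases h : n ≤ 1 <;> simp [h] <;> omega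
  rw [Bool.and_eq_true, hb0]
  constructor
  · rintro ⟨h2, hall⟩
    refine ⟨h2, fun i hi2 hin hdvd => ?_⟩
    have := List.all_eq_true.mp hall i (PySem.List.mem_pyRange_one.mpr ⟨hi2, hin⟩)
    simp [PySem.Int.mod_eq_zero_iff_dvd] at this
    exact this hdvd
  · rintro ⟨h2, hnd⟩
    refine ⟨h2, List.all_eq_true.mpr fun i hi => ?_⟩
    obtain ⟨hi2, hin⟩ := PySem.List.mem_pyRange_one.mp hi
    simp [PySem.Int.mod_eq_zero_iff_dvd]
    exact hnd i hi2 hin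

theorem noSmallDiv_iff (n i : Int) (hi : 2 ≤ i) :
    noSmallDiv n i = true ↔ ∀ j : Int, i ≤ j → j * j ≤ n → ¬ (j ∣ n) := by
  fun_induction noSmallDiv n i with
  | case1 i h hm =>
    simp only [Bool.false_eq_true, false_iff]
    intro hall
    exact hall i le_rfl h ((PySem.Int.mod_eq_zero_iff_dvd n i).mp hm)
  | case2 i h hm ih =>
    rw [ih (by omega)]
    constructor
    · intro hall j hij hjj hdvd
      rcases eq_or_lt_of_le hij with heq | hlt
      · subst heq
        exact hm ((PySem.Int.mod_eq_zero_iff_dvd n i).mpr hdvd)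
      · exact hall j (by omega) hjj hdvd
    · intro hall j hij hjj hdvd
      exact hall j (by omega) hjj hdvd
  | case3 i h =>
    simp only [true_iff]
    intro j hij hjj _
    have : i * i ≤ j * j := mul_le_mul hij hij (by omega) (by omega)
    linarith

-- the √-bounded test equals the full test (for n ≥ 2): pair each large divisor with its cofactor
theorem sqrt_test_eq_full (n : Int) (h2 : 2 ≤ n) :
    (∀ j : Int, 2 ≤ j → j * j ≤ n → ¬ (j ∣ n)) ↔ (∀ i : Int, 2 ≤ i → i < n → ¬ (i ∣ n)) := by
  constructor
  · intro hs i hi2 hin hdvd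
    rcases hdvd with ⟨d, hd⟩
    have hd1 : 1 ≤ d := by
      by_cases hd0 : d ≤ 0
      · have : i * d ≤ 0 := mul_nonpos_of_nonneg_of_nonpos (by omega) hd0
        linarith
      · omega
    have hd2 : 2 ≤ d := by
      rcases eq_or_lt_of_le hd1 with h1 | h1
      · have : n = i := by rw [hd, ← h1, mul_one]
        omega
      · omega
    by_cases hle : i * i ≤ n
    · exact hs i hi2 hle ⟨d, hd⟩
    · have hdi : d < i := by
        by_contra hdi
        have : i * i ≤ i * d := mul_le_mul_of_nonneg_left (not_lt.mp hdi) (by omega)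
        linarith
      have hn : n = d * i := by rw [hd]; ring
      have : d * d ≤ d * i := mul_le_mul_of_nonneg_left (le_of_lt hdi) (by omega)
      exact hs d hd2 (by linarith) ⟨i, hn⟩
  · intro hf j hj2 hjj hdvd
    have h2j : 2 * j ≤ j * j := mul_le_mul_of_nonneg_right (by omega) (by omega)
    exact hf j hj2 (by linarith) hdvd

theorem prime_tests_agree (n : Int) :
    is_primeA n = true ↔ (2 ≤ n ∧ noSmallDiv n 2 = true) := by
  rw [is_primeA_iff]
  constructor
  · rintro ⟨h2, hf⟩
    exact ⟨h2, (noSmallDiv_iff n 2 le_rfl).mpr ((sqrt_test_eq_full n h2).mpr hf)⟩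
  · rintro ⟨h2, hs⟩
    exact ⟨h2, (sqrt_test_eq_full n h2).mp ((noSmallDiv_iff n 2 le_rfl).mp hs)⟩

theorem check_eq_alt (digits : List Int) : check digits = check_alt digits := by
  induction digits with
  | nil => rfl
  | cons n rest ih =>
    by_cases hp : is_primeA n = true
    · have := (prime_tests_agree n).mp hp
      simp [check, checkLoopA, hp, check_alt, this]
    · have hnot : ¬ (2 ≤ n ∧ noSmallDiv n 2 = true) := fun h => hp ((prime_tests_agree n).mpr h)
      simp only [check, checkLoopA, hp, if_false, check_alt, hnot] at *
      exact ih

-- ===== VERDICT (by name: the statement is the Claim_ definition above) =====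
theorem check_spec : Claim_equal_check := by
  intro digits _
  unfold Spec_check
  exact check_eq_alt digits
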